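-- pv_equiv track=rewrite | github.com/dimafarer/calledit | eval/dashboard/pages/heatmap.py | _order_evaluators
-- ===== SOURCE A (Python) =====
-- PIPELINE_GROUPS = [
--     ("Parser", [
--         "IntentExtraction",          # LLM judge
--         "JSONValidity_parser",       # deterministic
--         "R1_JSONValidity_parser",    # deterministic (round 1)
--     ]),
--     ("Categorizer", [
--         "CategorizationJustification",       # LLM judge
--         "CategoryMatch",                     # deterministic
--         "ReasoningQuality_categorizer",      # LLM judge
--         "R2_CategoryMatch",                  # deterministic (round 2)
--         "R2_ReasoningQuality_categorizer",   # LLM judge (round 2)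
--     ]),
--     ("Verification Builder", [
--         "IntentPreservation",                        # LLM judge
--         "CriteriaMethodAlignment",                   # LLM judge
--         "JSONValidity_vb",                           # deterministic
--         "ReasoningQuality_verification_builder",     # LLM judge
--         "R2_ReasoningQuality_verification_builder",  # LLM judge (round 2)
--     ]),
--     ("Review", [
--         "ClarificationRelevance",        # LLM judge
--         "ClarificationQuality",          # deterministic
--         "R1_ClarificationQuality",       # deterministic (round 1)
--         "ReasoningQuality_review",       # LLM judge
--     ]),
--     ("Cross-Pipeline", [
--         "PipelineCoherence",    # LLM judge
--         "Convergence",          # deterministic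
--     ]),
-- ]
--
-- def _order_evaluators(evaluator_names: set[str]) -> tuple[list[str], list[tuple[str, int, int]]]:
--     """Order evaluators by pipeline stage, return group boundaries.
--
--     Evaluators not in the known pipeline groups go into an "Other" group at the end.
--     """
--     # Build the known set for detecting unknowns
--     known = set()
--     for _, members in PIPELINE_GROUPS:
--         known.update(members)
--
--     ordered = []
--     boundaries = []
--
--     for group_label, members in PIPELINE_GROUPS:
--         # Only include members that actually appear in the data
--         present = [m for m in members if m in evaluator_names]
--         if present:
--             start = len(ordered)
--             ordered.extend(present)
--             boundaries.append((group_label, start, len(ordered) - 1))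
--
--     # Collect unknowns
--     unknowns = sorted(evaluator_names - known)
--     if unknowns:
--         start = len(ordered)
--         ordered.extend(unknowns)
--         boundaries.append(("Other", start, len(ordered) - 1))
--
--     return ordered, boundaries
-- ===== SOURCE B (Python) =====
-- from itertools import groupby
--
-- PIPELINE_GROUPS = [
--     ("Parser", [
--         "IntentExtraction",
--         "JSONValidity_parser",
--         "R1_JSONValidity_parser",
--     ]),
--     ("Categorizer", [
--         "CategorizationJustification",
--         "CategoryMatch",
--         "ReasoningQuality_categorizer",
--         "R2_CategoryMatch",
--         "R2_ReasoningQuality_categorizer",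
--     ]),
--     ("Verification Builder", [
--         "IntentPreservation",
--         "CriteriaMethodAlignment",
--         "JSONValidity_vb",
--         "ReasoningQuality_verification_builder",
--         "R2_ReasoningQuality_verification_builder",
--     ]),
--     ("Review", [
--         "ClarificationRelevance",
--         "ClarificationQuality",
--         "R1_ClarificationQuality",
--         "ReasoningQuality_review",
--     ]),
--     ("Cross-Pipeline", [
--         "PipelineCoherence",
--         "Convergence",
--     ]),
-- ]
--
--
-- def _order_evaluators(evaluator_names):
--     """Rank-table + sort + run-detection re-implementation."""
--     # Rank every known evaluator: group index * 10 + position inside the group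
--     # (every group has fewer than 10 members).
--     rank = {}
--     labels = []
--     for gi, (label, members) in enumerate(PIPELINE_GROUPS):
--         labels.append(label)
--         for mi, m in enumerate(members):
--             rank[m] = gi * 10 + mi
--     labels.append("Other")
--     ng = len(PIPELINE_GROUPS)
--
--     def key(n):
--         r = rank.get(n)
--         # unknowns sort after every group, alphabetically
--         return (ng * 10, n) if r is None else (r, "")
--
--     ordered = sorted(evaluator_names, key=key)
--
--     boundaries = []
--     start = 0
--     for g, run in groupby(ordered, key=lambda n: key(n)[0] // 10):
--         size = sum(1 for _ in run)
--         boundaries.append((labels[g], start, start + size - 1))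
--         start += size
--     return ordered, boundaries
-- ===== Notes on version B (the rewrite author's own statement) =====
-- stated objective: alternative
-- what changed: Replaces A's interleaved per-group filter-and-record loop by a precomputed rank table, one key-based sort of the input names, and a separate run-detection (groupby) pass that emits the group boundaries.
import Mathlib
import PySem

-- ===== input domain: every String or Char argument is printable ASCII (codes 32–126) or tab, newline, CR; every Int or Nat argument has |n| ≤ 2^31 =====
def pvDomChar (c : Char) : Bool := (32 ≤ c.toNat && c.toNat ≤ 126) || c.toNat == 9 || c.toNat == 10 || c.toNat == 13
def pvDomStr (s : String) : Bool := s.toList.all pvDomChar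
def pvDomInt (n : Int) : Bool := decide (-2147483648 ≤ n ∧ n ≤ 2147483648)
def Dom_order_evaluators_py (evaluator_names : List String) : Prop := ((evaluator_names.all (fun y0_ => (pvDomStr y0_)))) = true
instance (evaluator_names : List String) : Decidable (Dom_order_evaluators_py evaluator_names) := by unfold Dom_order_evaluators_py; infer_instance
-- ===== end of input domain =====

-- B replaces A's interleaved filter-and-record loop by a rank table + one key-based sort +
-- a separate run-detection pass over the sorted list (objective: alternative decomposition).

-- ===== PORT A =====
def pvParserMembers : List String := ["IntentExtraction", "JSONValidity_parser", "R1_JSONValidity_parser"]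
def pvCategorizerMembers : List String := ["CategorizationJustification", "CategoryMatch", "ReasoningQuality_categorizer", "R2_CategoryMatch", "R2_ReasoningQuality_categorizer"]
def pvVBMembers : List String := ["IntentPreservation", "CriteriaMethodAlignment", "JSONValidity_vb", "ReasoningQuality_verification_builder", "R2_ReasoningQuality_verification_builder"]
def pvReviewMembers : List String := ["ClarificationRelevance", "ClarificationQuality", "R1_ClarificationQuality", "ReasoningQuality_review"]
def pvCrossMembers : List String := ["PipelineCoherence", "Convergence"]

def pipelineGroups : List (String × List String) :=
  [("Parser", pvParserMembers), ("Categorizer", pvCategorizerMembers),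
   ("Verification Builder", pvVBMembers), ("Review", pvReviewMembers),
   ("Cross-Pipeline", pvCrossMembers)]

-- the parameter is a Python set[str]; the List String holds its distinct elements
def order_evaluators_py (evaluator_names : List String) : List String × (List (String × Int × Int)) :=
  let known : PySem.Set String :=
    pipelineGroups.foldl (fun s p => PySem.Set.update s p.2) PySem.Set.empty
  let res :=
    pipelineGroups.foldl
      (fun (acc : List String × List (String × Int × Int)) p =>
        let present := p.2.filter (fun m => evaluator_names.contains m)
        if present.isEmpty then acc
        else
          let start : Int := acc.1.length
          let ordered := acc.1 ++ present
          (ordered, acc.2 ++ [(p.1, start, (ordered.length : Int) - 1)]))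
      ([], [])
  let unknowns := PySem.List.sorted (PySem.Set.diff evaluator_names known) (fun x => x) false
  if unknowns.isEmpty then res
  else (res.1 ++ unknowns,
        res.2 ++ [("Other", (res.1.length : Int), ((res.1.length + unknowns.length : Nat) : Int) - 1)])

-- ===== PORT B =====
-- rank table: known evaluator ↦ group index * 10 + position in the group
def pvRank : PySem.Dict String Int :=
  (PySem.List.enumerate pipelineGroups).foldl
    (fun d g => (PySem.List.enumerate g.2.2).foldl
      (fun d m => PySem.Dict.insert d m.2 (g.1 * 10 + m.1)) d)
    PySem.Dict.empty

def pvLabels : List String := pipelineGroups.map Prod.fst ++ ["Other"]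

def pvNG : Int := pipelineGroups.length

-- Python's tuple sort key (r, "") / (ng*10, n); the tuple's lexicographic comparison is Int ×ₗ String
def pvKeyB (n : String) : Int ×ₗ String :=
  match PySem.Dict.get? pvRank n with
  | none => toLex (pvNG * 10, n)
  | some r => toLex (r, "")

def pvGroupOf (n : String) : Int := PySem.Int.floordiv (ofLex (pvKeyB n)).1 10

-- itertools.groupby consumed into (key, run length) pairs, left to right
def pvRunsAux (f : String → Int) : List String → Int → Int → List (Int × Int)
  | [], k, c => [(k, c)]
  | x :: xs, k, c => if f x == k then pvRunsAux f xs k (c + 1) else (k, c) :: pvRunsAux f xs (f x) 1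

def pvRuns (f : String → Int) : List String → List (Int × Int)
  | [] => []
  | x :: xs => pvRunsAux f xs (f x) 1

def order_evaluators_py_alt (evaluator_names : List String) : List String × (List (String × Int × Int)) :=
  let ordered := PySem.List.sorted evaluator_names pvKeyB false
  let runs := pvRuns pvGroupOf ordered
  let boundaries :=
    (runs.foldl
      (fun (acc : List (String × Int × Int) × Int) r =>
        -- pvLabels has 6 entries and every run key is in 0..5, so the index is always in range
        (acc.1 ++ [(PySem.List.pyGetD pvLabels r.1 "", acc.2, acc.2 + r.2 - 1)], acc.2 + r.2))
      ([], (0 : Int))).1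
  (ordered, boundaries)

-- ===== PRECONDITION & SPEC =====
-- The Python parameter is a set[str]; under the type convention the list holds the set's
-- DISTINCT elements, so Pre_ states exactly that the list is duplicate-free (a list with
-- duplicates encodes no Python set, and A can never receive one).
def Pre_order_evaluators_py (evaluator_names : List String) : Prop := evaluator_names.Nodup

instance (evaluator_names : List String) : Decidable (Pre_order_evaluators_py evaluator_names) := by
  unfold Pre_order_evaluators_py; infer_instance

def pvWitness_order_evaluators_py : List String := ["IntentExtraction", "Convergence", "zeta"]

def Spec_order_evaluators_py (evaluator_names : List String) (out : List String × (List (String × Int × Int))) : Prop := out = order_evaluators_py_alt evaluator_names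
instance (evaluator_names : List String) (out : List String × (List (String × Int × Int))) : Decidable (Spec_order_evaluators_py evaluator_names out) := by unfold Spec_order_evaluators_py; infer_instance

-- ===== CLAIM (what is proved, stated in full; the proofs are below) =====
def Claim_equal_order_evaluators_py : Prop := ∀ (evaluator_names : List String), Dom_order_evaluators_py evaluator_names → Pre_order_evaluators_py evaluator_names → Spec_order_evaluators_py evaluator_names (order_evaluators_py evaluator_names)

-- ===== LEMMAS AND PROOFS =====

-- all 19 known evaluator names, in pipeline order
def pvKList : List String :=
  pvParserMembers ++ (pvCategorizerMembers ++ (pvVBMembers ++ (pvReviewMembers ++ (pvCrossMembers ++ []))))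

-- the ordered unknowns
def pvU (names : List String) : List String :=
  PySem.List.sorted (names.filter fun x => !pvKList.contains x) (fun x => x) false

-- the six blocks (group index, label, members present), "Other" last
def pvBlocks (names : List String) : List (Int × String × List String) :=
  [(0, "Parser", pvParserMembers.filter (fun m => names.contains m)),
   (1, "Categorizer", pvCategorizerMembers.filter (fun m => names.contains m)),
   (2, "Verification Builder", pvVBMembers.filter (fun m => names.contains m)),
   (3, "Review", pvReviewMembers.filter (fun m => names.contains m)),
   (4, "Cross-Pipeline", pvCrossMembers.filter (fun m => names.contains m)),
   (5, "Other", pvU names)]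

def pvFlat (bs : List (Int × String × List String)) : List String := (bs.map (·.2.2)).flatten

-- boundaries of a block list, starting at s
def pvBnds : List (Int × String × List String) → Int → List (String × Int × Int)
  | [], _ => []
  | b :: bs, s =>
    (if b.2.2.isEmpty then [] else [(b.2.1, s, s + b.2.2.length - 1)]) ++ pvBnds bs (s + b.2.2.length)

-- boundaries of a group list under a given input, starting at s (shape of A's loop)
def pvBndsA (names : List String) : List (String × List String) → Int → List (String × Int × Int)
  | [], _ => []
  | g :: gs, s =>
    (if (g.2.filter (fun m => names.contains m)).isEmpty then []
     else [(g.1, s, s + (g.2.filter (fun m => names.contains m)).length - 1)]) ++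
      pvBndsA names gs (s + (g.2.filter (fun m => names.contains m)).length)

-- boundaries from a run list, starting at s (shape of B's loop)
def pvBnds2 : List (Int × Int) → Int → List (String × Int × Int)
  | [], _ => []
  | r :: rs, s => (PySem.List.pyGetD pvLabels r.1 "", s, s + r.2 - 1) :: pvBnds2 rs (s + r.2)

lemma known_eq : (pipelineGroups.foldl (fun s p => PySem.Set.update s p.2) PySem.Set.empty) = pvKList := by decide

lemma keys_rank : PySem.Dict.keys pvRank = pvKList := by decide

lemma rank_none (x : String) (h : x ∉ pvKList) : PySem.Dict.get? pvRank x = none := by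
  rw [PySem.Dict.get?_eq_none_iff_not_mem_keys, keys_rank]; exact h

lemma keyB_unknown (x : String) (h : x ∉ pvKList) : pvKeyB x = toLex (50, x) := by
  simp [pvKeyB, rank_none x h]; rfl

-- ---- A-side characterisation ----
lemma foldA (names : List String) (gs : List (String × List String))
    (o : List String) (b : List (String × Int × Int)) :
    gs.foldl
      (fun (acc : List String × List (String × Int × Int)) p =>
        let present := p.2.filter (fun m => names.contains m)
        if present.isEmpty then acc
        else
          let start : Int := acc.1.length
          let ordered := acc.1 ++ present
          (ordered, acc.2 ++ [(p.1, start, (ordered.length : Int) - 1)])) (o, b)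
      = (o ++ (gs.map fun p => p.2.filter (fun m => names.contains m)).flatten,
         b ++ pvBndsA names gs o.length) := by
  induction gs generalizing o b with
  | nil => simp [pvBndsA]
  | cons g gs ih =>
    by_cases hg : (g.2.filter (fun m => names.contains m)).isEmpty
    · have hg' : g.2.filter (fun m => names.contains m) = [] := List.isEmpty_iff.mp hg
      simp only [List.foldl_cons, List.map_cons, List.flatten_cons, pvBndsA, hg, if_true, ite_true]
      rw [ih, hg']
      simp
    · simp only [List.foldl_cons, List.map_cons, List.flatten_cons, pvBndsA, hg,
        Bool.false_eq_true, if_false, ite_false]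
      rw [ih]
      simp only [Prod.mk.injEq, List.append_assoc, List.length_append, true_and]
      push_cast
      rfl

lemma A_eq_blocks (names : List String) :
    order_evaluators_py names = (pvFlat (pvBlocks names), pvBnds (pvBlocks names) 0) := by
  unfold order_evaluators_py
  simp only [known_eq, foldA, List.nil_append, List.length_nil, Nat.cast_zero]
  have hdiff : PySem.Set.diff names pvKList = names.filter (fun x => !pvKList.contains x) := by
    simp [PySem.Set.diff, PySem.Set.contains]
  rw [hdiff]
  have hU : PySem.List.sorted (names.filter (fun x => !pvKList.contains x)) (fun x => x) false = pvU names := rfl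
  rw [hU]
  have hflat : pvFlat (pvBlocks names) =
      (pipelineGroups.map fun p => p.2.filter (fun m => names.contains m)).flatten ++ pvU names := by
    simp [pvFlat, pvBlocks, pipelineGroups]
  have hlen : (((pipelineGroups.map fun p => p.2.filter (fun m => names.contains m)).flatten.length : Nat) : Int)
      = 0 + ((pvParserMembers.filter (fun m => names.contains m)).length : Int)
        + ((pvCategorizerMembers.filter (fun m => names.contains m)).length : Int)
        + ((pvVBMembers.filter (fun m => names.contains m)).length : Int)
        + ((pvReviewMembers.filter (fun m => names.contains m)).length : Int)
        + ((pvCrossMembers.filter (fun m => names.contains m)).length : Int) := by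
    simp only [pipelineGroups, List.map_cons, List.map_nil, List.flatten_cons, List.flatten_nil,
      List.append_nil, List.length_append]
    push_cast
    ring
  have hbnds : pvBnds (pvBlocks names) 0 =
      pvBndsA names pipelineGroups 0 ++
        (if (pvU names).isEmpty then []
         else [("Other",
                0 + ((pvParserMembers.filter (fun m => names.contains m)).length : Int)
                  + ((pvCategorizerMembers.filter (fun m => names.contains m)).length : Int)
                  + ((pvVBMembers.filter (fun m => names.contains m)).length : Int)
                  + ((pvReviewMembers.filter (fun m => names.contains m)).length : Int)
                  + ((pvCrossMembers.filter (fun m => names.contains m)).length : Int),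
                0 + ((pvParserMembers.filter (fun m => names.contains m)).length : Int)
                  + ((pvCategorizerMembers.filter (fun m => names.contains m)).length : Int)
                  + ((pvVBMembers.filter (fun m => names.contains m)).length : Int)
                  + ((pvReviewMembers.filter (fun m => names.contains m)).length : Int)
                  + ((pvCrossMembers.filter (fun m => names.contains m)).length : Int)
                  + ((pvU names).length : Int) - 1)]) := by
    simp only [pvBlocks, pvBnds, pvBndsA, pipelineGroups]
    split_ifs with h1 <;> simp [List.append_assoc]
  by_cases hUe : (pvU names).isEmpty
  · have hUe' : pvU names = [] := List.isEmpty_iff.mp hUe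
    rw [if_pos hUe, hflat, hbnds, if_pos hUe]
    simp [hUe']
  · rw [if_neg hUe, hflat, hbnds, if_neg hUe]
    have e2 : ((((pipelineGroups.map fun p => p.2.filter (fun m => names.contains m)).flatten.length
          + (pvU names).length : Nat)) : Int) - 1
        = 0 + ((pvParserMembers.filter (fun m => names.contains m)).length : Int)
          + ((pvCategorizerMembers.filter (fun m => names.contains m)).length : Int)
          + ((pvVBMembers.filter (fun m => names.contains m)).length : Int)
          + ((pvReviewMembers.filter (fun m => names.contains m)).length : Int)
          + ((pvCrossMembers.filter (fun m => names.contains m)).length : Int)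
          + ((pvU names).length : Int) - 1 := by
      push_cast
      rw [hlen]
    rw [e2, hlen]

-- ---- B-side: the sort equals the block concatenation ----
lemma flat_blocks (names : List String) :
    pvFlat (pvBlocks names) = pvKList.filter (fun m => names.contains m) ++ pvU names := by
  simp [pvFlat, pvBlocks, pvKList, List.filter_append]

lemma kpair : pvKList.Pairwise (fun a b => pvKeyB a < pvKeyB b) := by decide

lemma k50 : ∀ x ∈ pvKList, (ofLex (pvKeyB x)).1 < 50 := by decide

lemma sort_eq_blocks (names : List String) (h : names.Nodup) :
    PySem.List.sorted names pvKeyB false = pvFlat (pvBlocks names) := by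
  rw [flat_blocks]
  have hUperm : (pvU names).Perm (names.filter (fun x => !pvKList.contains x)) :=
    PySem.List.sorted_perm _ _ _
  have hUnodup : (pvU names).Nodup := hUperm.nodup_iff.mpr (h.filter _)
  have hUmem : ∀ x ∈ pvU names, x ∉ pvKList := by
    intro x hx
    have := hUperm.mem_iff.mp hx
    simp only [List.mem_filter, Bool.not_eq_true'] at this
    intro hmem
    have := this.2
    simp [List.contains_iff_mem] at this
    exact this hmem
  apply PySem.List.sorted_eq_of_perm_of_pairwise_lt
  · -- permutation
    have h2 : (pvKList.filter (fun m => names.contains m)).Perm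
        (names.filter (fun x => pvKList.contains x)) := by
      rw [List.perm_ext_iff_of_nodup ((by decide : pvKList.Nodup).filter _) (h.filter _)]
      intro a
      simp [List.mem_filter, List.contains_iff_mem, and_comm]
    exact (h2.append hUperm).trans (List.filter_append_perm _ names)
  · -- pairwise strictly increasing keys
    rw [List.pairwise_append]
    refine ⟨kpair.filter _, ?_, ?_⟩
    · -- unknown part
      have hUlt : (pvU names).Pairwise (· < ·) := by
        have hle : (pvU names).Pairwise (fun a b : String => a ≤ b) := by
          have := PySem.List.sorted_pairwise (names.filter (fun x => !pvKList.contains x)) (fun x => x)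
          exact this
        have hne : (pvU names).Pairwise (· ≠ ·) := hUnodup
        exact (hle.and hne).imp (fun h => lt_of_le_of_ne h.1 h.2)
      refine hUlt.imp_of_mem ?_
      intro a b ha hb hab
      rw [keyB_unknown a (hUmem a ha), keyB_unknown b (hUmem b hb), Prod.Lex.toLex_lt_toLex]
      right; exact ⟨rfl, hab⟩
    · -- known keys below unknown keys
      intro a ha b hb
      have haK : a ∈ pvKList := (List.mem_filter.mp ha).1
      rw [keyB_unknown b (hUmem b hb)]
      have : pvKeyB a = toLex (ofLex (pvKeyB a)) := rfl
      rw [this, Prod.Lex.toLex_lt_toLex]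
      left
      exact lt_of_lt_of_le (k50 a haK) (by norm_num)

-- ---- runs of the block concatenation ----
lemma runsAux_skip (f : String → Int) (p rest : List String) (k c : Int)
    (hp : ∀ x ∈ p, f x = k) :
    pvRunsAux f (p ++ rest) k c = pvRunsAux f rest k (c + p.length) := by
  induction p generalizing c with
  | nil => simp [pvRunsAux]
  | cons x p ih =>
    have hx : f x = k := hp x (List.mem_cons_self)
    simp only [List.cons_append, pvRunsAux]
    rw [if_pos (by simp [hx])]
    rw [ih _ (fun z hz => hp z (List.mem_cons_of_mem _ hz))]
    congr 1
    simp only [List.length_cons]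
    push_cast
    ring

lemma runsAux_close (f : String → Int) (rest : List String) (k c : Int)
    (hne : ∀ y ∈ rest, f y ≠ k) :
    pvRunsAux f rest k c = (k, c) :: pvRuns f rest := by
  cases rest with
  | nil => rfl
  | cons y ys =>
    have hy : (f y == k) = false := by simp [hne y List.mem_cons_self]
    simp [pvRunsAux, pvRuns, hy]

lemma runs_flatten (f : String → Int) (bs : List (Int × String × List String))
    (hom : ∀ b ∈ bs, ∀ x ∈ b.2.2, f x = b.1)
    (inc : bs.Pairwise (fun b c => b.1 < c.1)) :
    pvRuns f (pvFlat bs) =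
      (bs.filter (fun b => !b.2.2.isEmpty)).map (fun b => (b.1, (b.2.2.length : Int))) := by
  induction bs with
  | nil => rfl
  | cons b bs ih =>
    have homtail : ∀ c ∈ bs, ∀ x ∈ c.2.2, f x = c.1 :=
      fun c hc => hom c (List.mem_cons_of_mem _ hc)
    have inctail : bs.Pairwise (fun b c => b.1 < c.1) := (List.pairwise_cons.mp inc).2
    have hne : ∀ y ∈ pvFlat bs, f y ≠ b.1 := by
      intro y hy
      simp only [pvFlat, List.mem_flatten, List.mem_map] at hy
      obtain ⟨l, ⟨c, hc, rfl⟩, hyl⟩ := hy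
      have h1 := homtail c hc y hyl
      have h2 := (List.pairwise_cons.mp inc).1 c hc
      omega
    cases hp : b.2.2 with
    | nil =>
      have : pvFlat (b :: bs) = pvFlat bs := by simp [pvFlat, hp]
      rw [this, ih homtail inctail]
      simp [List.filter_cons, hp]
    | cons x p' =>
      have hfx : f x = b.1 := hom b List.mem_cons_self x (by rw [hp]; exact List.mem_cons_self)
      have hflatc : pvFlat (b :: bs) = x :: (p' ++ pvFlat bs) := by simp [pvFlat, hp]
      rw [hflatc]
      simp only [pvRuns]
      rw [hfx,
        runsAux_skip f p' _ b.1 1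
          (fun z hz => hom b List.mem_cons_self z (by rw [hp]; exact List.mem_cons_of_mem _ hz)),
        runsAux_close f _ _ _ hne, ih homtail inctail]
      simp [List.filter_cons, hp]
      push_cast; ring

-- ---- B-side boundaries fold ----
lemma foldB (rs : List (Int × Int)) (b : List (String × Int × Int)) (s : Int) :
    (rs.foldl
      (fun (acc : List (String × Int × Int) × Int) r =>
        (acc.1 ++ [(PySem.List.pyGetD pvLabels r.1 "", acc.2, acc.2 + r.2 - 1)], acc.2 + r.2))
      (b, s)).1 = b ++ pvBnds2 rs s := by
  induction rs generalizing b s with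
  | nil => simp [pvBnds2]
  | cons r rs ih =>
    simp only [List.foldl_cons]
    rw [ih]
    simp [pvBnds2]

lemma bnds2_eq_bnds (bs : List (Int × String × List String)) (s : Int)
    (hlab : ∀ b ∈ bs, PySem.List.pyGetD pvLabels b.1 "" = b.2.1) :
    pvBnds2 ((bs.filter (fun b => !b.2.2.isEmpty)).map (fun b => (b.1, (b.2.2.length : Int)))) s
      = pvBnds bs s := by
  induction bs generalizing s with
  | nil => rfl
  | cons b bs ih =>
    have htail : ∀ c ∈ bs, PySem.List.pyGetD pvLabels c.1 "" = c.2.1 :=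
      fun c hc => hlab c (List.mem_cons_of_mem _ hc)
    by_cases hb : b.2.2.isEmpty
    · have hb' : b.2.2 = [] := List.isEmpty_iff.mp hb
      simp [pvBnds, List.filter_cons, hb, hb', ih _ htail]
    · simp [pvBnds, pvBnds2, List.filter_cons, hb, hlab b List.mem_cons_self, ih _ htail]

lemma blocks_hom (names : List String) :
    ∀ b ∈ pvBlocks names, ∀ x ∈ b.2.2, pvGroupOf x = b.1 := by
  intro b hb
  have g0 : ∀ x ∈ pvParserMembers, pvGroupOf x = 0 := by decide
  have g1 : ∀ x ∈ pvCategorizerMembers, pvGroupOf x = 1 := by decide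
  have g2 : ∀ x ∈ pvVBMembers, pvGroupOf x = 2 := by decide
  have g3 : ∀ x ∈ pvReviewMembers, pvGroupOf x = 3 := by decide
  have g4 : ∀ x ∈ pvCrossMembers, pvGroupOf x = 4 := by decide
  have hU : ∀ x ∈ pvU names, pvGroupOf x = 5 := by
    intro x hx
    have hnk : x ∉ pvKList := by
      have := (PySem.List.sorted_perm _ _ _ : (pvU names).Perm _).mem_iff.mp hx
      simp only [List.mem_filter, Bool.not_eq_true'] at this
      intro hmem
      have h2 := this.2
      simp [List.contains_iff_mem] at h2
      exact h2 hmem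
    simp [pvGroupOf, keyB_unknown x hnk]
  simp only [pvBlocks, List.mem_cons, List.not_mem_nil, or_false] at hb
  rcases hb with rfl | rfl | rfl | rfl | rfl | rfl
  · exact fun x hx => g0 x (List.mem_of_mem_filter hx)
  · exact fun x hx => g1 x (List.mem_of_mem_filter hx)
  · exact fun x hx => g2 x (List.mem_of_mem_filter hx)
  · exact fun x hx => g3 x (List.mem_of_mem_filter hx)
  · exact fun x hx => g4 x (List.mem_of_mem_filter hx)
  · exact hU

lemma blocks_inc (names : List String) :
    (pvBlocks names).Pairwise (fun b c => b.1 < c.1) := by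
  simp [pvBlocks, List.pairwise_cons]

lemma blocks_lab (names : List String) :
    ∀ b ∈ pvBlocks names, PySem.List.pyGetD pvLabels b.1 "" = b.2.1 := by
  intro b hb
  simp only [pvBlocks, List.mem_cons, List.not_mem_nil, or_false] at hb
  rcases hb with rfl | rfl | rfl | rfl | rfl | rfl <;> rfl

lemma B_eq_blocks (names : List String) (h : names.Nodup) :
    order_evaluators_py_alt names = (pvFlat (pvBlocks names), pvBnds (pvBlocks names) 0) := by
  simp only [order_evaluators_py_alt]
  rw [sort_eq_blocks names h,
      runs_flatten pvGroupOf (pvBlocks names) (blocks_hom names) (blocks_inc names),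
      foldB, bnds2_eq_bnds (pvBlocks names) 0 (blocks_lab names)]
  simp

-- ===== VERDICT (by name: the statement is the Claim_ definition above) =====
theorem order_evaluators_py_spec : Claim_equal_order_evaluators_py := by
  intro names _ hpre
  unfold Spec_order_evaluators_py
  rw [A_eq_blocks names, B_eq_blocks names hpre]
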